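-- pv_equiv track=rewrite | github.com/Demonware/bladerunner | bladerunner.py | commandInLine
-- ===== SOURCE A (Python) =====
-- def commandInLine(command, l):
--     if len(command) < 60: # this only applies to long commands
--         return False
--     cl = [command[:60], command[-60:]]
--     count = 60
--     while(1):
--         cladd = command[count:(count + 60)]
--         if len(cladd) != 60: break
--         cl.append(cladd)
--         count += 60
--     for fraction in cl:
--         if l.find(fraction) > -1:
--             return True
--     return False
-- ===== SOURCE B (Python) =====
-- def commandInLine(command, l):
--     n = len(command)
--     if n < 60:
--         return False
--     chunks = {command[i:i + 60] for i in range(0, n - 59, 60)}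
--     chunks.add(command[n - 60:])
--     return any(l[j:j + 60] in chunks for j in range(len(l) - 59))
-- ===== Notes on version B (the rewrite author's own statement) =====
-- stated objective: alternative
-- what changed: Instead of running a substring search over l for each 60-char chunk of command, B builds the set of chunks once and makes a single pass over l's 60-char windows, testing each window against the hash set (asymptotically O(|command|+60|l|) vs O(|command|*|l|), though the difference was below timing resolution on the benchmark inputs).
import Mathlib
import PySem

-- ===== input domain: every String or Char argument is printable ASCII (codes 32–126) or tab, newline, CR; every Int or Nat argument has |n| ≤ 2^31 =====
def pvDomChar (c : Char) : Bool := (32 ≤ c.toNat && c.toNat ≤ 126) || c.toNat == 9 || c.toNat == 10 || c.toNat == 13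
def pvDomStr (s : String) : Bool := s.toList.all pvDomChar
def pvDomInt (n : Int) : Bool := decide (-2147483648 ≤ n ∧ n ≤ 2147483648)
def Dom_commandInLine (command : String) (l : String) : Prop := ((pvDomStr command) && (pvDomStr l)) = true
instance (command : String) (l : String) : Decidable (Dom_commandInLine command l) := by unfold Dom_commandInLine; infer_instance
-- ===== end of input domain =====

-- B replaces A's per-chunk substring searches (one l.find per 60-char chunk of command) by a
-- single scan of l's 60-char windows against a set of all chunks; return value only, no mutation.

-- ===== PORT A =====
-- cited by pvClLoop's decreasing_by (and reused in the proofs below): command[count:count+60]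
theorem pvSliceCount (cs : List Char) (count : Nat) :
    PySem.List.slice cs (some (count : Int)) (some ((count : Int) + 60)) = (cs.drop count).take 60 := by
  have h : ((count : Int) + 60) = (((count + 60 : Nat)) : Int) := by push_cast; ring
  rw [h, PySem.List.slice_natCast]
  congr 1
  omega

-- A's 'while(1)' loop: keeps appending command[count:count+60] while it has length 60
def pvClLoop (cs : List Char) (acc : List (List Char)) (count : Nat) : List (List Char) :=
  let cladd := PySem.List.slice cs (some (count : Int)) (some ((count : Int) + 60))
  if cladd.length ≠ 60 then acc
  else pvClLoop cs (acc ++ [cladd]) (count + 60)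
termination_by cs.length - count
decreasing_by
  rename_i h
  simp only [cladd, pvSliceCount] at h
  simp only [List.length_take, List.length_drop, ne_eq, Decidable.not_not] at h
  omega

def commandInLine (command : String) (l : String) : Bool :=
  let cs := command.toList
  if cs.length < 60 then false
  else
    let cl := pvClLoop cs
      [PySem.List.slice cs none (some 60), PySem.List.slice cs (some (-60)) none] 60
    cl.any (fun fraction => decide ((-1 : Int) < PySem.Chars.find l.toList fraction))

-- ===== PORT B =====
def commandInLine_alt (command : String) (l : String) : Bool :=
  let cs := command.toList
  let n := cs.length
  if n < 60 then false
  else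
    let chunks : PySem.Set (List Char) :=
      PySem.Set.ofList ((PySem.List.pyRange 0 ((n : Int) - 59) 60).map
        (fun i => PySem.List.slice cs (some i) (some (i + 60))))
    let chunks := PySem.Set.add chunks (PySem.List.slice cs (some ((n : Int) - 60)) none)
    (PySem.List.pyRange 0 ((l.toList.length : Int) - 59) 1).any
      (fun j => PySem.Set.contains chunks (PySem.List.slice l.toList (some j) (some (j + 60))))

-- ===== PRECONDITION & SPEC =====
def Spec_commandInLine (command : String) (l : String) (out : Bool) : Prop := out = commandInLine_alt command l
instance (command : String) (l : String) (out : Bool) : Decidable (Spec_commandInLine command l out) := by unfold Spec_commandInLine; infer_instance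

-- ===== CLAIM (what is proved, stated in full; the proofs are below) =====
def Claim_equal_commandInLine : Prop := ∀ (command : String) (l : String), Dom_commandInLine command l → Spec_commandInLine command l (commandInLine command l)

-- ===== LEMMAS AND PROOFS =====

-- t occurs in s iff some length-|t| window of s equals t
theorem pvInfixIffWindow {α : Type} (t s : List α) :
    t <:+: s ↔ ∃ j, j + t.length ≤ s.length ∧ (s.drop j).take t.length = t := by
  constructor
  · rintro ⟨p, u, rfl⟩
    refine ⟨p.length, by simp, ?_⟩
    rw [List.append_assoc, List.drop_left, List.take_left]
  · rintro ⟨j, hj, h⟩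
    have h1 : t <+: s.drop j := h ▸ List.take_prefix _ _
    exact h1.isInfix.trans (s.drop_suffix j).isInfix

-- membership in A's loop result: acc plus every full 60-chunk at count, count+60, …
theorem pvClLoop_mem (cs : List Char) (acc : List (List Char)) (count : Nat) (x : List Char) :
    x ∈ pvClLoop cs acc count ↔
      x ∈ acc ∨ ∃ q : Nat, count + 60 * q + 60 ≤ cs.length ∧ x = (cs.drop (count + 60 * q)).take 60 := by
  fun_induction pvClLoop cs acc count with
  | case1 acc count cladd h =>
    simp only [cladd, pvSliceCount, List.length_take, List.length_drop, ne_eq] at h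
    constructor
    · exact Or.inl
    · rintro (hx | ⟨q, hq, rfl⟩)
      · exact hx
      · omega
  | case2 acc count cladd h ih =>
    simp only [cladd, pvSliceCount] at h ih ⊢
    simp only [List.length_take, List.length_drop, ne_eq, Decidable.not_not] at h
    rw [ih]
    simp only [List.mem_append, List.mem_singleton]
    constructor
    · rintro ((hx | rfl) | ⟨q, hq, rfl⟩)
      · exact Or.inl hx
      · exact Or.inr ⟨0, by omega, by norm_num⟩
      · exact Or.inr ⟨q + 1, by omega, by ring_nf⟩
    · rintro (hx | ⟨q, hq, rfl⟩)
      · exact Or.inl (Or.inl hx)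
      · cases q with
        | zero => exact Or.inl (Or.inr (by norm_num))
        | succ q => exact Or.inr ⟨q, by omega, by ring_nf⟩

-- the common characterisation: both programs test whether some window of l is a chunk of command
def pvChunk (cs : List Char) (k : Nat) : List Char := (cs.drop k).take 60
def pvM (cs x : List Char) : Prop :=
  (∃ k : Nat, 60 ∣ k ∧ k + 60 ≤ cs.length ∧ x = pvChunk cs k) ∨ x = cs.drop (cs.length - 60)
def pvKey (cs ls : List Char) : Prop :=
  ∃ j : Nat, j + 60 ≤ ls.length ∧ pvM cs ((ls.drop j).take 60)

theorem pvM_length (cs x : List Char) (h60 : 60 ≤ cs.length) (h : pvM cs x) : x.length = 60 := by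
  rcases h with ⟨k, _, hk, rfl⟩ | rfl
  · simp [pvChunk]; omega
  · simp; omega

theorem pvA_iff (command l : String) (h : 60 ≤ command.toList.length) :
    commandInLine command l = true ↔ pvKey command.toList l.toList := by
  unfold commandInLine
  rw [if_neg (by omega)]
  rw [List.any_eq_true]
  have hmem : ∀ x, (x ∈ pvClLoop command.toList
      [PySem.List.slice command.toList none (some 60),
       PySem.List.slice command.toList (some (-60)) none] 60) ↔ pvM command.toList x := by
    intro x
    rw [pvClLoop_mem]
    have e1 : PySem.List.slice command.toList none (some 60) = command.toList.take 60 := by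
      simp [pysem]
    have e2 : PySem.List.slice command.toList (some (-60)) none
        = command.toList.drop (command.toList.length - 60) := by
      simp [pysem]
    rw [e1, e2]
    simp only [List.mem_cons, List.not_mem_nil, or_false]
    constructor
    · rintro ((rfl | rfl) | ⟨q, hq, rfl⟩)
      · exact Or.inl ⟨0, ⟨0, by ring⟩, by omega, by simp [pvChunk]⟩
      · exact Or.inr rfl
      · exact Or.inl ⟨60 + 60 * q, ⟨1 + q, by ring⟩, by omega, rfl⟩
    · rintro (⟨k, ⟨c, rfl⟩, hk, rfl⟩ | rfl)
      · cases c with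
        | zero => exact Or.inl (Or.inl (by simp [pvChunk]))
        | succ c => exact Or.inr ⟨c, by omega, by rw [pvChunk]; ring_nf⟩
      · exact Or.inl (Or.inr rfl)
  constructor
  · rintro ⟨x, hx, hfind⟩
    rw [hmem] at hx
    rw [decide_eq_true_iff] at hfind
    have hinf : x <:+: l.toList := (PySem.Chars.find_nonneg_iff _ _).mp (by omega)
    rw [pvInfixIffWindow, pvM_length command.toList x h hx] at hinf
    obtain ⟨j, hj, hwin⟩ := hinf
    exact ⟨j, hj, hwin ▸ hx⟩
  · rintro ⟨j, hj, hM⟩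
    refine ⟨(l.toList.drop j).take 60, (hmem _).mpr hM, ?_⟩
    rw [decide_eq_true_iff]
    have hinf : (l.toList.drop j).take 60 <:+: l.toList := by
      rw [pvInfixIffWindow, pvM_length command.toList _ h hM]
      exact ⟨j, hj, rfl⟩
    have := (PySem.Chars.find_nonneg_iff l.toList _).mpr hinf
    omega

theorem pvB_iff (command l : String) (h : 60 ≤ command.toList.length) :
    commandInLine_alt command l = true ↔ pvKey command.toList l.toList := by
  unfold commandInLine_alt
  rw [if_neg (by omega)]
  rw [List.any_eq_true]
  have hBmem : ∀ x, (x ∈ PySem.Set.add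
      (PySem.Set.ofList ((PySem.List.pyRange 0 ((command.toList.length : Int) - 59) 60).map
        (fun i => PySem.List.slice command.toList (some i) (some (i + 60)))))
      (PySem.List.slice command.toList (some ((command.toList.length : Int) - 60)) none)) ↔
      pvM command.toList x := by
    intro x
    rw [PySem.Set.mem_add, PySem.Set.mem_ofList, List.mem_map]
    have hlast : PySem.List.slice command.toList (some ((command.toList.length : Int) - 60)) none
        = command.toList.drop (command.toList.length - 60) := by
      rw [PySem.List.slice_from command.toList (by omega)]
      congr 1
      omega
    rw [hlast]
    constructor
    · rintro (⟨i, hi, rfl⟩ | rfl)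
      · rw [PySem.List.mem_pyRange_iff_of_pos (by norm_num)] at hi
        obtain ⟨h0, hlt, hdvd⟩ := hi
        lift i to ℕ using h0 with k
        refine Or.inl ⟨k, ?_, by omega, by rw [pvSliceCount]; rfl⟩
        omega
      · exact Or.inr rfl
    · rintro (⟨k, hdvd, hk, rfl⟩ | rfl)
      · refine Or.inl ⟨(k : Int), ?_, by rw [pvSliceCount]; rfl⟩
        rw [PySem.List.mem_pyRange_iff_of_pos (by norm_num)]
        refine ⟨by omega, by omega, by omega⟩
      · exact Or.inr rfl
  constructor
  · rintro ⟨j, hj, hc⟩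
    rw [PySem.List.mem_pyRange_one] at hj
    obtain ⟨h0, hlt⟩ := hj
    rw [PySem.Set.contains_iff, hBmem] at hc
    lift j to ℕ using h0 with jN
    rw [pvSliceCount] at hc
    exact ⟨jN, by omega, hc⟩
  · rintro ⟨j, hj, hM⟩
    refine ⟨(j : Int), ?_, ?_⟩
    · rw [PySem.List.mem_pyRange_one]
      constructor <;> omega
    · rw [PySem.Set.contains_iff, hBmem, pvSliceCount]
      exact hM

-- ===== VERDICT (by name: the statement is the Claim_ definition above) =====
theorem commandInLine_spec : Claim_equal_commandInLine := by
  intro command l _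
  unfold Spec_commandInLine
  by_cases h : command.toList.length < 60
  · unfold commandInLine commandInLine_alt
    rw [if_pos h, if_pos h]
  · rw [Bool.eq_iff_iff, pvA_iff command l (by omega), pvB_iff command l (by omega)]
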